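-- pv_equiv track=rewrite | github.com/sheyn018/SE-Ilokano-Tagalog-Translator | module/il_tl/doc_trans_smt_il/__init__.py | in_F_Phrases
-- ===== SOURCE A (Python) =====
-- def in_F_Phrases(word, word2, word3, word4, word5, word6, word7, il_phrases):
--     """
--     Check if a given set of words form a phrase in the phrase list.
--
--     Parameters:
--         word (str): The first word to check.
--         word2 (str): The second word to check.
--         word3 (str): The third word to check.
--         word4 (str): The fourth word to check.
--         word5 (str): The fifth word to check.
--         word6 (str): The sixth word to check.
--         word7 (str): The seventh word to check.
--         il_phrases (list): List of phrases in Ilokano.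
--
--     Returns:
--         tuple: A tuple containing three values:
--             - inFPhrases (bool): Indicates if the words form a phrase.
--             - il_phrase (list): The phrase formed by the words, if any.
--             - w_used (int): The number of words used to form the phrase.
--     """
--
--     inFPhrases = False
--     il_phrase = []
--     w_used = 0
--
--     for phrase in il_phrases:
--         length = len(phrase)
--         if length == 7:
--             if word == phrase[0] and word2 == phrase[1] and word3 == phrase[2] and word4 == phrase[3] and word5 == phrase[4] and word6 == phrase[5] and word7 == phrase[6]:
--                 inFPhrases = True
--                 il_phrase = phrase
--                 w_used = 7
--                 break
--         if length == 6:
--             if word == phrase[0] and word2 == phrase[1] and word3 == phrase[2] and word4 == phrase[3] and word5 == phrase[4] and word6 == phrase[5]: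
--                 inFPhrases = True
--                 il_phrase = phrase
--                 w_used = 6
--                 break
--         if length == 5:
--             if word == phrase[0] and word2 == phrase[1] and word3 == phrase[2] and word4 == phrase[3] and word5 == phrase[4]:
--                 inFPhrases = True
--                 il_phrase = phrase
--                 w_used = 5
--                 break
--         if length == 4:
--             if word == phrase[0] and word2 == phrase[1] and word3 == phrase[2] and word4 == phrase[3]:
--                 inFPhrases = True
--                 il_phrase = phrase
--                 w_used = 4
--                 break
--         if length == 3:
--             if word == phrase[0] and word2 == phrase[1] and word3 == phrase[2]:
--                 inFPhrases = True
--                 il_phrase = phrase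
--                 w_used = 3
--                 break
--         if length == 2:
--             if word == phrase[0] and word2 == phrase[1]:
--                 inFPhrases = True
--                 il_phrase = phrase
--                 w_used = 2
--                 break
--         if length == 1:
--             if word == phrase[0]:
--                 inFPhrases = True
--                 il_phrase = phrase
--                 w_used = 1
--                 break
--
--     return inFPhrases, il_phrase, w_used
-- ===== SOURCE B (Python) =====
-- def in_F_Phrases(word, word2, word3, word4, word5, word6, word7, il_phrases):
--     words = [word, word2, word3, word4, word5, word6, word7]
--     # index each phrase (as a tuple) by its first position, in one pass
--     first_at = {}
--     for i, p in enumerate(il_phrases):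
--         first_at.setdefault(tuple(p), i)
--     # a phrase matches iff it equals one of the 7 prefixes words[:1..7];
--     # the first match in il_phrases is the candidate with minimal first position
--     best = None
--     for L in range(1, 8):
--         i = first_at.get(tuple(words[:L]))
--         if i is not None and (best is None or i < best):
--             best = i
--     if best is None:
--         return False, [], 0
--     p = il_phrases[best]
--     return True, p, len(p)
-- ===== Notes on version B (the rewrite author's own statement) =====
-- stated objective: alternative
-- what changed: Instead of scanning phrases and testing each against the words, B builds a hash index phrase->first position in one pass (setdefault) and then performs seven dictionary lookups, one per candidate prefix words[:L], returning the phrase with the minimal indexed position; the scan never inspects the words at all.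
import Mathlib
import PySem

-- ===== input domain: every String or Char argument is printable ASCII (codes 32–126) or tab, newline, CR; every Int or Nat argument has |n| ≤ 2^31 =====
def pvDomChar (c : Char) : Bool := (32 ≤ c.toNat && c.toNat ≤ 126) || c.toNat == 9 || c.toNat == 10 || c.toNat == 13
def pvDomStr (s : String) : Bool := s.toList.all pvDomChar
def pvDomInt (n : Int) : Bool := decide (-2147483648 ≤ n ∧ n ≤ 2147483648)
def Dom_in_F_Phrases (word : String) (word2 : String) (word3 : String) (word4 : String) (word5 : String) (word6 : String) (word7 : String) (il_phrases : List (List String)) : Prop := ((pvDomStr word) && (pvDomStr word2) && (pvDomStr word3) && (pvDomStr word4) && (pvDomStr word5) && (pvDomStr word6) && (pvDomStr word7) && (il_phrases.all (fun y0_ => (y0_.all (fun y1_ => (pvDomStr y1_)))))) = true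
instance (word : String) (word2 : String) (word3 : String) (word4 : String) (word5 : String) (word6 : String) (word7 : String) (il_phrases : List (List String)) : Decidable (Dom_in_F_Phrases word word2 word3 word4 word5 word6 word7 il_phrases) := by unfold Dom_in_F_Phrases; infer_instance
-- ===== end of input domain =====

-- B replaces A's scan-and-test with a hash index built once (phrase → first position) plus seven
-- candidate-prefix lookups taking the minimal position; same O(n) cost, different algorithm.

-- ===== PORT A =====
def in_F_Phrases (word : String) (word2 : String) (word3 : String) (word4 : String) (word5 : String) (word6 : String) (word7 : String) (il_phrases : List (List String)) : Bool × List String × Int :=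
  match il_phrases with
  | [] => (false, [], 0)
  | phrase :: rest =>
    let length := phrase.length
    if length = 7 ∧ PySem.List.pyGet? phrase 0 = some word ∧ PySem.List.pyGet? phrase 1 = some word2 ∧ PySem.List.pyGet? phrase 2 = some word3 ∧ PySem.List.pyGet? phrase 3 = some word4 ∧ PySem.List.pyGet? phrase 4 = some word5 ∧ PySem.List.pyGet? phrase 5 = some word6 ∧ PySem.List.pyGet? phrase 6 = some word7 then
      (true, phrase, 7)
    else if length = 6 ∧ PySem.List.pyGet? phrase 0 = some word ∧ PySem.List.pyGet? phrase 1 = some word2 ∧ PySem.List.pyGet? phrase 2 = some word3 ∧ PySem.List.pyGet? phrase 3 = some word4 ∧ PySem.List.pyGet? phrase 4 = some word5 ∧ PySem.List.pyGet? phrase 5 = some word6 then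
      (true, phrase, 6)
    else if length = 5 ∧ PySem.List.pyGet? phrase 0 = some word ∧ PySem.List.pyGet? phrase 1 = some word2 ∧ PySem.List.pyGet? phrase 2 = some word3 ∧ PySem.List.pyGet? phrase 3 = some word4 ∧ PySem.List.pyGet? phrase 4 = some word5 then
      (true, phrase, 5)
    else if length = 4 ∧ PySem.List.pyGet? phrase 0 = some word ∧ PySem.List.pyGet? phrase 1 = some word2 ∧ PySem.List.pyGet? phrase 2 = some word3 ∧ PySem.List.pyGet? phrase 3 = some word4 then
      (true, phrase, 4)
    else if length = 3 ∧ PySem.List.pyGet? phrase 0 = some word ∧ PySem.List.pyGet? phrase 1 = some word2 ∧ PySem.List.pyGet? phrase 2 = some word3 then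
      (true, phrase, 3)
    else if length = 2 ∧ PySem.List.pyGet? phrase 0 = some word ∧ PySem.List.pyGet? phrase 1 = some word2 then
      (true, phrase, 2)
    else if length = 1 ∧ PySem.List.pyGet? phrase 0 = some word then
      (true, phrase, 1)
    else
      in_F_Phrases word word2 word3 word4 word5 word6 word7 rest

-- ===== PORT B =====
def in_F_Phrases_alt (word : String) (word2 : String) (word3 : String) (word4 : String) (word5 : String) (word6 : String) (word7 : String) (il_phrases : List (List String)) : Bool × List String × Int :=
  let words := [word, word2, word3, word4, word5, word6, word7]
  -- first_at = {}; for i, p in enumerate(il_phrases): first_at.setdefault(tuple(p), i)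
  let firstAt := (PySem.List.enumerate il_phrases 0).foldl
      (fun d ip => d.setdefault ip.2 ip.1) PySem.Dict.empty
  -- best = None; for L in range(1, 8): i = first_at.get(words[:L]); if i is not None and (best is None or i < best): best = i
  let best := (PySem.List.pyRange 1 8 1).foldl
      (fun best L =>
        match firstAt.get? (PySem.List.slice words none (some L)) with
        | none => best
        | some i =>
          match best with
          | none => some i
          | some b => if i < b then some i else best) none
  match best with
  | none => (false, [], 0)
  | some i =>
    let p := (PySem.List.pyGet? il_phrases i).getD []   -- il_phrases[best]; best is always in range here
    (true, p, (p.length : Int))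

-- ===== PRECONDITION & SPEC =====
def Spec_in_F_Phrases (word : String) (word2 : String) (word3 : String) (word4 : String) (word5 : String) (word6 : String) (word7 : String) (il_phrases : List (List String)) (out : Bool × List String × Int) : Prop := out = in_F_Phrases_alt word word2 word3 word4 word5 word6 word7 il_phrases
instance (word : String) (word2 : String) (word3 : String) (word4 : String) (word5 : String) (word6 : String) (word7 : String) (il_phrases : List (List String)) (out : Bool × List String × Int) : Decidable (Spec_in_F_Phrases word word2 word3 word4 word5 word6 word7 il_phrases out) := by unfold Spec_in_F_Phrases; infer_instance

-- ===== CLAIM (what is proved, stated in full; the proofs are below) =====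
def Claim_equal_in_F_Phrases : Prop := ∀ (word : String) (word2 : String) (word3 : String) (word4 : String) (word5 : String) (word6 : String) (word7 : String) (il_phrases : List (List String)), Dom_in_F_Phrases word word2 word3 word4 word5 word6 word7 il_phrases → Spec_in_F_Phrases word word2 word3 word4 word5 word6 word7 il_phrases (in_F_Phrases word word2 word3 word4 word5 word6 word7 il_phrases)

-- ===== LEMMAS AND PROOFS =====

-- first index of the exact list k in ps (proof-layer characterisation of the dict lookup)
def pvFirstIdx (k : List String) : List (List String) → Option Nat
  | [] => none
  | p :: rest => if p = k then some 0 else (pvFirstIdx k rest).map (· + 1)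

-- the min-accumulation step of B's second loop
def pvMinStep (b : Option Int) (x : Option Int) : Option Int :=
  match x with
  | none => b
  | some i =>
    match b with
    | none => some i
    | some v => if i < v then some i else b

theorem pvDict_get (ps : List (List String)) (n : Int) (d : PySem.Dict (List String) Int) (k : List String) :
    ((PySem.List.enumerate ps n).foldl (fun d ip => d.setdefault ip.2 ip.1) d).get? k
      = ((d.get? k).or ((pvFirstIdx k ps).map (fun j => (j : Int) + n))) := by
  induction ps generalizing n d with
  | nil => simp [PySem.List.enumerate_nil, pvFirstIdx]
  | cons p rest ih =>
    rw [PySem.List.enumerate_cons]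
    simp only [List.foldl_cons, ih]
    by_cases hk : p = k
    · subst hk
      by_cases hc : d.contains p
      · rw [PySem.Dict.setdefault_of_contains d n hc]
        rw [PySem.Dict.contains_eq_isSome_get? d p] at hc
        obtain ⟨v, hv⟩ := Option.isSome_iff_exists.mp hc
        simp [hv, pvFirstIdx]
      · have hc' : d.contains p = false := by simpa using hc
        rw [PySem.Dict.setdefault_of_not_contains d n hc']
        have hnone : d.get? p = none := by
          rw [PySem.Dict.contains_eq_isSome_get? d p] at hc'
          simpa using hc'
        simp [PySem.Dict.get?_insert_self, hnone, pvFirstIdx]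
    · have hget : (d.setdefault p n).get? k = d.get? k := by
        by_cases hc : d.contains p
        · rw [PySem.Dict.setdefault_of_contains d n hc]
        · have hc' : d.contains p = false := by simpa using hc
          rw [PySem.Dict.setdefault_of_not_contains d n hc']
          exact PySem.Dict.get?_insert_of_ne d n (fun h => hk h.symm)
      rw [hget]
      simp only [pvFirstIdx, if_neg hk]
      cases pvFirstIdx k rest with
      | none => simp
      | some j =>
        cases hdk : d.get? k with
        | some v => simp
        | none =>
          simp
          omega

def pvNatMinStep (b : Option Nat) (x : Option Nat) : Option Nat :=
  match x with
  | none => b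
  | some i =>
    match b with
    | none => some i
    | some v => if i < v then some i else b

theorem pvMinStep_cast (b x : Option Nat) :
    pvMinStep (b.map (fun (j : Nat) => (j : Int))) (x.map (fun (j : Nat) => (j : Int)))
      = (pvNatMinStep b x).map (fun (j : Nat) => (j : Int)) := by
  cases x with
  | none => cases b <;> simp [pvMinStep, pvNatMinStep]
  | some i =>
    cases b with
    | none => simp [pvMinStep, pvNatMinStep]
    | some v =>
      by_cases h : i < v
      · simp [pvMinStep, pvNatMinStep, h, show (i : Int) < (v : Int) by omega]
      · simp [pvMinStep, pvNatMinStep, h, show ¬((i : Int) < (v : Int)) by omega]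

theorem pvMinStep_cast1 (b x : Option Nat) :
    pvMinStep (b.map (fun (j : Nat) => (j : Int) + 1)) (x.map (fun (j : Nat) => (j : Int) + 1))
      = (pvNatMinStep b x).map (fun (j : Nat) => (j : Int) + 1) := by
  cases x with
  | none => cases b <;> simp [pvMinStep, pvNatMinStep]
  | some i =>
    cases b with
    | none => simp [pvMinStep, pvNatMinStep]
    | some v =>
      by_cases h : i < v
      · simp [pvMinStep, pvNatMinStep, h, show (i : Int) + 1 < (v : Int) + 1 by omega]
      · simp [pvMinStep, pvNatMinStep, h, show ¬((i : Int) + 1 < (v : Int) + 1) by omega]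

theorem pvFold_shift (xs : List (Option Nat)) (b : Option Nat) :
    (xs.map (fun x => x.map (fun (j : Nat) => ((j : Int) + 1)))).foldl pvMinStep (b.map (fun (j : Nat) => ((j : Int) + 1)))
      = ((xs.map (fun x => x.map (fun (j : Nat) => (j : Int)))).foldl pvMinStep (b.map (fun (j : Nat) => (j : Int)))).map (· + 1) := by
  induction xs generalizing b with
  | nil => cases b <;> simp
  | cons x rest ih =>
    simp only [List.map_cons, List.foldl_cons]
    rw [pvMinStep_cast1, pvMinStep_cast]
    exact ih (pvNatMinStep b x)

theorem pvFold_keep_zero (xs : List (Option Int))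
    (hnn : ∀ x ∈ xs, ∀ v, x = some v → 0 ≤ v) :
    xs.foldl pvMinStep (some 0) = some 0 := by
  induction xs with
  | nil => rfl
  | cons y ys ih =>
    have hstep : pvMinStep (some 0) y = some 0 := by
      cases y with
      | none => simp [pvMinStep]
      | some v =>
        have hv : (0:Int) ≤ v := hnn (some v) (List.mem_cons_self ..) v rfl
        simp only [pvMinStep]
        rw [if_neg (by omega)]
    simp only [List.foldl_cons, hstep]
    exact ih (fun x hx => hnn x (List.mem_cons_of_mem _ hx))

theorem pvFold_zero (xs : List (Option Int)) (b : Option Int)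
    (hb : ∀ v, b = some v → 0 ≤ v) (hx : (some (0 : Int)) ∈ xs)
    (hnn : ∀ x ∈ xs, ∀ v, x = some v → 0 ≤ v) :
    xs.foldl pvMinStep b = some 0 := by
  induction xs generalizing b with
  | nil => cases hx
  | cons x rest ih =>
    simp only [List.foldl_cons]
    rcases List.mem_cons.mp hx with h0 | h0
    · subst h0
      have hstep : pvMinStep b (some 0) = some 0 := by
        cases b with
        | none => simp [pvMinStep]
        | some v =>
          have hv := hb v rfl
          simp only [pvMinStep]
          by_cases h : (0 : Int) < v
          · rw [if_pos h]
          · have : v = 0 := by omega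
            rw [if_neg h, this]
      rw [hstep]
      exact pvFold_keep_zero rest (fun x hx => hnn x (List.mem_cons_of_mem _ hx))
    · exact ih (pvMinStep b x)
        (by
          intro v hv
          cases x with
          | none => simp [pvMinStep] at hv; exact hb v hv
          | some i =>
            have hi := hnn (some i) (List.mem_cons_self ..) i rfl
            cases b with
            | none => simp [pvMinStep] at hv; omega
            | some w =>
              have hw := hb w rfl
              simp only [pvMinStep] at hv
              split at hv <;> simp_all)
        h0 (fun x hx => hnn x (List.mem_cons_of_mem _ hx))

def pvGs (w1 w2 w3 w4 w5 w6 w7 : String) (ps : List (List String)) : List (Option Nat) :=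
  [pvFirstIdx [w1] ps, pvFirstIdx [w1, w2] ps, pvFirstIdx [w1, w2, w3] ps,
   pvFirstIdx [w1, w2, w3, w4] ps, pvFirstIdx [w1, w2, w3, w4, w5] ps,
   pvFirstIdx [w1, w2, w3, w4, w5, w6] ps, pvFirstIdx [w1, w2, w3, w4, w5, w6, w7] ps]

def pvBRes (w1 w2 w3 w4 w5 w6 w7 : String) (ps : List (List String)) : Option Int :=
  ((pvGs w1 w2 w3 w4 w5 w6 w7 ps).map (Option.map (fun (j : Nat) => (j : Int)))).foldl pvMinStep none

def pvDecode (ps : List (List String)) (r : Option Int) : Bool × List String × Int :=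
  match r with
  | none => (false, [], 0)
  | some i =>
    let p := (PySem.List.pyGet? ps i).getD []
    (true, p, (p.length : Int))

theorem pvDict_get0 (ps : List (List String)) (k : List String) :
    ((PySem.List.enumerate ps 0).foldl (fun d ip => d.setdefault ip.2 ip.1) PySem.Dict.empty).get? k
      = (pvFirstIdx k ps).map (fun (j : Nat) => (j : Int)) := by
  rw [pvDict_get]
  cases pvFirstIdx k ps <;> simp

theorem pvAlt_eq (w1 w2 w3 w4 w5 w6 w7 : String) (ps : List (List String)) :
    in_F_Phrases_alt w1 w2 w3 w4 w5 w6 w7 ps = pvDecode ps (pvBRes w1 w2 w3 w4 w5 w6 w7 ps) := by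
  unfold in_F_Phrases_alt pvBRes pvGs pvDecode
  rw [show PySem.List.pyRange 1 8 1 = [(1 : Int), 2, 3, 4, 5, 6, 7] from by decide]
  simp only [List.foldl_cons, List.foldl_nil, List.map_cons, List.map_nil, pvDict_get0, pvMinStep]
  rfl

theorem pvMapped_nonneg (gs : List (Option Nat)) :
    ∀ x ∈ gs.map (Option.map (fun (j : Nat) => (j : Int))), ∀ v, x = some v → 0 ≤ v := by
  intro x hx v hv
  rcases List.mem_map.mp hx with ⟨o, _, rfl⟩
  cases o with
  | none => simp at hv
  | some j => simp at hv; omega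

theorem pvBRes_nonneg (w1 w2 w3 w4 w5 w6 w7 : String) (ps : List (List String)) :
    ∀ v, pvBRes w1 w2 w3 w4 w5 w6 w7 ps = some v → 0 ≤ v := by
  unfold pvBRes
  generalize pvGs w1 w2 w3 w4 w5 w6 w7 ps = gs
  have H : ∀ (xs : List (Option Int)) (b : Option Int), (∀ v, b = some v → 0 ≤ v) →
      (∀ x ∈ xs, ∀ v, x = some v → 0 ≤ v) → ∀ v, xs.foldl pvMinStep b = some v → 0 ≤ v := by
    intro xs
    induction xs with
    | nil => intro b hb _ v hv; exact hb v hv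
    | cons x rest ih =>
      intro b hb hnn v hv
      simp only [List.foldl_cons] at hv
      refine ih (pvMinStep b x) ?_ (fun x hx => hnn x (List.mem_cons_of_mem _ hx)) v hv
      intro u hu
      cases x with
      | none => simp [pvMinStep] at hu; exact hb u hu
      | some i =>
        have hi := hnn (some i) (List.mem_cons_self ..) i rfl
        cases b with
        | none => simp [pvMinStep] at hu; omega
        | some w =>
          have hw := hb w rfl
          simp only [pvMinStep] at hu
          split at hu <;> simp_all
  exact H _ none (by simp) (pvMapped_nonneg gs)

theorem pvHit (w1 w2 w3 w4 w5 w6 w7 : String) (p : List String) (rest : List (List String))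
    (h : p = [w1] ∨ p = [w1, w2] ∨ p = [w1, w2, w3] ∨ p = [w1, w2, w3, w4] ∨
         p = [w1, w2, w3, w4, w5] ∨ p = [w1, w2, w3, w4, w5, w6] ∨ p = [w1, w2, w3, w4, w5, w6, w7]) :
    pvDecode (p :: rest) (pvBRes w1 w2 w3 w4 w5 w6 w7 (p :: rest)) = (true, p, (p.length : Int)) := by
  have hz : pvBRes w1 w2 w3 w4 w5 w6 w7 (p :: rest) = some 0 := by
    unfold pvBRes
    refine pvFold_zero _ none (by simp) ?_ (pvMapped_nonneg _)
    rcases h with h | h | h | h | h | h | h <;> subst h <;> simp [pvGs, pvFirstIdx]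
  rw [hz]
  simp [pvDecode, PySem.List.pyGet?, PySem.List.pyIdx?]

theorem pvShift (w1 w2 w3 w4 w5 w6 w7 : String) (p : List String) (rest : List (List String))
    (h1 : p ≠ [w1]) (h2 : p ≠ [w1, w2]) (h3 : p ≠ [w1, w2, w3]) (h4 : p ≠ [w1, w2, w3, w4])
    (h5 : p ≠ [w1, w2, w3, w4, w5]) (h6 : p ≠ [w1, w2, w3, w4, w5, w6])
    (h7 : p ≠ [w1, w2, w3, w4, w5, w6, w7]) :
    pvBRes w1 w2 w3 w4 w5 w6 w7 (p :: rest) = (pvBRes w1 w2 w3 w4 w5 w6 w7 rest).map (· + 1) := by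
  have comp : ∀ (o : Option Nat), (o.map (fun j => j + 1)).map (fun (j : Nat) => (j : Int)) = o.map (fun (j : Nat) => (j : Int) + 1) := by
    intro o; cases o <;> simp
  unfold pvBRes pvGs
  simp only [pvFirstIdx, if_neg h1, if_neg h2,
    if_neg h3, if_neg h4, if_neg h5,
    if_neg h6, if_neg h7, List.map_cons, List.map_nil, comp]
  have := pvFold_shift [pvFirstIdx [w1] rest, pvFirstIdx [w1, w2] rest, pvFirstIdx [w1, w2, w3] rest,
    pvFirstIdx [w1, w2, w3, w4] rest, pvFirstIdx [w1, w2, w3, w4, w5] rest,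
    pvFirstIdx [w1, w2, w3, w4, w5, w6] rest, pvFirstIdx [w1, w2, w3, w4, w5, w6, w7] rest] none
  simpa using this

theorem pvDecode_shift (p : List String) (rest : List (List String)) (r : Option Int)
    (hr : ∀ v, r = some v → 0 ≤ v) :
    pvDecode (p :: rest) (r.map (· + 1)) = pvDecode rest r := by
  cases r with
  | none => rfl
  | some i =>
    have hi := hr i rfl
    obtain ⟨n, rfl⟩ : ∃ n : Nat, i = (n : Int) := ⟨i.toNat, by omega⟩
    simp only [Option.map_some, pvDecode]
    have : ((n : Int) + 1) = ((n + 1 : Nat) : Int) := by push_cast; ring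
    rw [this, PySem.List.pyGet?_natCast, PySem.List.pyGet?_natCast]
    simp

theorem pvMain (w1 w2 w3 w4 w5 w6 w7 : String) (ps : List (List String)) :
    in_F_Phrases w1 w2 w3 w4 w5 w6 w7 ps = pvDecode ps (pvBRes w1 w2 w3 w4 w5 w6 w7 ps) := by
  induction ps with
  | nil => simp [in_F_Phrases, pvBRes, pvGs, pvFirstIdx, pvMinStep, pvDecode]
  | cons p rest ih =>
    rcases p with _ | ⟨a1, _ | ⟨a2, _ | ⟨a3, _ | ⟨a4, _ | ⟨a5, _ | ⟨a6, _ | ⟨a7, _ | ⟨a8, t⟩⟩⟩⟩⟩⟩⟩⟩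
    · rw [pvShift _ _ _ _ _ _ _ _ _ (by simp) (by simp) (by simp) (by simp) (by simp) (by simp) (by simp),
        pvDecode_shift _ _ _ (pvBRes_nonneg _ _ _ _ _ _ _ _)]
      simpa [in_F_Phrases] using ih
    · by_cases hk : a1 = w1
      · subst hk
        rw [pvHit _ _ _ _ _ _ _ _ _ (Or.inl rfl)]
        simp [in_F_Phrases, PySem.List.pyGet?, PySem.List.pyIdx?]
      · rw [pvShift _ _ _ _ _ _ _ _ _ (by simp [hk]) (by simp) (by simp) (by simp) (by simp) (by simp) (by simp),
          pvDecode_shift _ _ _ (pvBRes_nonneg _ _ _ _ _ _ _ _)]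
        simpa [in_F_Phrases, PySem.List.pyGet?, PySem.List.pyIdx?, hk] using ih
    · by_cases hk : a1 = w1 ∧ a2 = w2
      · obtain ⟨rfl, rfl⟩ := hk
        rw [pvHit _ _ _ _ _ _ _ _ _ (Or.inr (Or.inl rfl))]
        simp [in_F_Phrases, PySem.List.pyGet?, PySem.List.pyIdx?]
      · rw [pvShift _ _ _ _ _ _ _ _ _ (by simp) (by simp [hk, List.cons.injEq]) (by simp) (by simp) (by simp) (by simp) (by simp),
          pvDecode_shift _ _ _ (pvBRes_nonneg _ _ _ _ _ _ _ _)]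
        simp only [in_F_Phrases, PySem.List.pyGet?, PySem.List.pyIdx?]
        simpa [PySem.List.pyGet?, PySem.List.pyIdx?, hk] using ih
    · by_cases hk : a1 = w1 ∧ a2 = w2 ∧ a3 = w3
      · obtain ⟨rfl, rfl, rfl⟩ := hk
        rw [pvHit _ _ _ _ _ _ _ _ _ (Or.inr (Or.inr (Or.inl rfl)))]
        simp [in_F_Phrases, PySem.List.pyGet?, PySem.List.pyIdx?]
      · rw [pvShift _ _ _ _ _ _ _ _ _ (by simp) (by simp) (by simp [hk, List.cons.injEq]) (by simp) (by simp) (by simp) (by simp),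
          pvDecode_shift _ _ _ (pvBRes_nonneg _ _ _ _ _ _ _ _)]
        simpa [in_F_Phrases, PySem.List.pyGet?, PySem.List.pyIdx?, hk] using ih
    · by_cases hk : a1 = w1 ∧ a2 = w2 ∧ a3 = w3 ∧ a4 = w4
      · obtain ⟨rfl, rfl, rfl, rfl⟩ := hk
        rw [pvHit _ _ _ _ _ _ _ _ _ (Or.inr (Or.inr (Or.inr (Or.inl rfl))))]
        simp [in_F_Phrases, PySem.List.pyGet?, PySem.List.pyIdx?]
      · rw [pvShift _ _ _ _ _ _ _ _ _ (by simp) (by simp) (by simp) (by simp [hk, List.cons.injEq]) (by simp) (by simp) (by simp),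
          pvDecode_shift _ _ _ (pvBRes_nonneg _ _ _ _ _ _ _ _)]
        simpa [in_F_Phrases, PySem.List.pyGet?, PySem.List.pyIdx?, hk] using ih
    · by_cases hk : a1 = w1 ∧ a2 = w2 ∧ a3 = w3 ∧ a4 = w4 ∧ a5 = w5
      · obtain ⟨rfl, rfl, rfl, rfl, rfl⟩ := hk
        rw [pvHit _ _ _ _ _ _ _ _ _ (Or.inr (Or.inr (Or.inr (Or.inr (Or.inl rfl)))))]
        simp [in_F_Phrases, PySem.List.pyGet?, PySem.List.pyIdx?]
      · rw [pvShift _ _ _ _ _ _ _ _ _ (by simp) (by simp) (by simp) (by simp) (by simp [hk, List.cons.injEq]) (by simp) (by simp),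
          pvDecode_shift _ _ _ (pvBRes_nonneg _ _ _ _ _ _ _ _)]
        simpa [in_F_Phrases, PySem.List.pyGet?, PySem.List.pyIdx?, hk] using ih
    · by_cases hk : a1 = w1 ∧ a2 = w2 ∧ a3 = w3 ∧ a4 = w4 ∧ a5 = w5 ∧ a6 = w6
      · obtain ⟨rfl, rfl, rfl, rfl, rfl, rfl⟩ := hk
        rw [pvHit _ _ _ _ _ _ _ _ _ (Or.inr (Or.inr (Or.inr (Or.inr (Or.inr (Or.inl rfl))))))]
        simp [in_F_Phrases, PySem.List.pyGet?, PySem.List.pyIdx?]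
      · rw [pvShift _ _ _ _ _ _ _ _ _ (by simp) (by simp) (by simp) (by simp) (by simp) (by simp [hk, List.cons.injEq]) (by simp),
          pvDecode_shift _ _ _ (pvBRes_nonneg _ _ _ _ _ _ _ _)]
        simpa [in_F_Phrases, PySem.List.pyGet?, PySem.List.pyIdx?, hk] using ih
    · by_cases hk : a1 = w1 ∧ a2 = w2 ∧ a3 = w3 ∧ a4 = w4 ∧ a5 = w5 ∧ a6 = w6 ∧ a7 = w7
      · obtain ⟨rfl, rfl, rfl, rfl, rfl, rfl, rfl⟩ := hk
        rw [pvHit _ _ _ _ _ _ _ _ _ (Or.inr (Or.inr (Or.inr (Or.inr (Or.inr (Or.inr rfl))))))]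
        simp [in_F_Phrases, PySem.List.pyGet?, PySem.List.pyIdx?]
      · rw [pvShift _ _ _ _ _ _ _ _ _ (by simp) (by simp) (by simp) (by simp) (by simp) (by simp) (by simp [hk, List.cons.injEq]),
          pvDecode_shift _ _ _ (pvBRes_nonneg _ _ _ _ _ _ _ _)]
        simpa [in_F_Phrases, PySem.List.pyGet?, PySem.List.pyIdx?, hk] using ih
    · rw [pvShift _ _ _ _ _ _ _ _ _ (by simp) (by simp) (by simp) (by simp) (by simp) (by simp) (by simp),
        pvDecode_shift _ _ _ (pvBRes_nonneg _ _ _ _ _ _ _ _)]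
      simpa [in_F_Phrases] using ih

-- ===== VERDICT (by name: the statement is the Claim_ definition above) =====
theorem in_F_Phrases_spec : Claim_equal_in_F_Phrases := by
  intro w1 w2 w3 w4 w5 w6 w7 ps _
  unfold Spec_in_F_Phrases
  rw [pvAlt_eq]
  exact pvMain w1 w2 w3 w4 w5 w6 w7 ps
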